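-- pv_equiv track=rewrite | github.com/elmoriconi/prova | test.py | are_mirrored
-- ===== SOURCE A (Python) =====
-- def are_mirrored(tree: list[int], left_index: int, right_index: int):
--     if left_index >= len(tree) or right_index >= len(tree):
--         return left_index == right_index
--     if tree[left_index] != tree[right_index]:
--         return False
--     left_of_left = 2*left_index + 1
--     right_of_left = 2* (left_index + 1)
--     left_of_right = 2*right_index + 1
--     right_of_right = 2* (right_index + 1)
--     symmetric_extremes = are_mirrored(tree, left_of_left, right_of_right)
--     symmetric_inner = are_mirrored(tree, right_of_left, left_of_right)
--     return symmetric_extremes and symmetric_inner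
-- ===== SOURCE B (Python) =====
-- def are_mirrored(tree: list[int], left_index: int, right_index: int):
--     n = len(tree)
--     stack = [(left_index, right_index)]
--     while stack:
--         l, r = stack.pop()
--         if l >= n or r >= n:
--             if l != r:
--                 return False
--             continue
--         if tree[l] != tree[r]:
--             return False
--         stack.append((2*l + 1, 2*r + 2))
--         stack.append((2*l + 2, 2*r + 1))
--     return True
-- ===== Notes on version B (the rewrite author's own statement) =====
-- stated objective: alternative
-- what changed: A's double self-recursion over child index pairs is replaced by an iterative while-loop over an explicit stack of index pairs (a worklist), popping a pair, checking it, and pushing its two child pairs.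
-- outside the precondition, e.g. on are_mirrored([1, 2], -1, 0): A returns False, B returns False
import Mathlib
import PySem

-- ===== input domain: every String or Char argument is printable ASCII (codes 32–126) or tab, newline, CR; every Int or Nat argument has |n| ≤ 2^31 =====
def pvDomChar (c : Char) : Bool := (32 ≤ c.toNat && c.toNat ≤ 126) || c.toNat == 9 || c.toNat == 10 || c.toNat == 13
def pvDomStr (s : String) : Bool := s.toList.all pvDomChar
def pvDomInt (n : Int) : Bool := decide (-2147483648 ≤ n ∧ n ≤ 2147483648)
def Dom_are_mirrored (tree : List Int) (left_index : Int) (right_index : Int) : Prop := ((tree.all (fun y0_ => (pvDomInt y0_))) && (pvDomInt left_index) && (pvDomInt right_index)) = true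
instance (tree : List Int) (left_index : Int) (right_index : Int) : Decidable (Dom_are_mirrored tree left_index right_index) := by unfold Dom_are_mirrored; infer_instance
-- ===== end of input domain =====

-- B replaces A's double recursion by an iterative worklist (explicit stack of index pairs); same return value, no recursion.

-- ===== PORT A =====
-- fuel only makes the recursion total in Lean; for nonnegative start indices (Pre_)
-- the recursion depth is bounded by tree.length + 1, so the fuel is never exhausted there.
def are_mirroredAux (tree : List Int) (fuel : Nat) (l r : Int) : Bool :=
  if l ≥ (tree.length : Int) ∨ r ≥ (tree.length : Int) then decide (l = r)
  else if PySem.List.pyGet? tree l ≠ PySem.List.pyGet? tree r then false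
  else
    match fuel with
    | 0 => false
    | Nat.succ f =>
        are_mirroredAux tree f (2*l + 1) (2*(r + 1)) && are_mirroredAux tree f (2*(l + 1)) (2*r + 1)

def are_mirrored (tree : List Int) (left_index : Int) (right_index : Int) : Bool :=
  are_mirroredAux tree (tree.length + 1) left_index right_index

-- ===== PORT B =====
-- fuel only makes the while-loop total in Lean; for nonnegative start indices the number of
-- processed pairs is below 3 ^ (tree.length + 2), so the fuel is never exhausted there.
def are_mirroredLoop (tree : List Int) (fuel : Nat) (stack : List (Int × Int)) : Bool :=
  match fuel, stack with
  | _, [] => true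
  | 0, _ :: _ => false
  | Nat.succ f, (l, r) :: rest =>
    if l ≥ (tree.length : Int) ∨ r ≥ (tree.length : Int) then
      if l ≠ r then false else are_mirroredLoop tree f rest
    else if PySem.List.pyGet? tree l ≠ PySem.List.pyGet? tree r then false
    else are_mirroredLoop tree f ((2*l + 2, 2*r + 1) :: (2*l + 1, 2*r + 2) :: rest)

def are_mirrored_alt (tree : List Int) (left_index : Int) (right_index : Int) : Bool :=
  are_mirroredLoop tree (3 ^ (tree.length + 2)) [(left_index, right_index)]

-- ===== PRECONDITION & SPEC =====
-- Pre_ excludes negative start indices: there Python's negative-index wraparound makes both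
-- programs compare wrapped elements, and the recursion can reach an index below -len(tree)
-- (IndexError) or revisit the same negative pair forever (RecursionError in A, an infinite
-- loop in B) — behaviour that is an artefact of negative indexing, not tree symmetry.
def Pre_are_mirrored (tree : List Int) (left_index : Int) (right_index : Int) : Prop :=
  0 ≤ left_index ∧ 0 ≤ right_index
instance (tree : List Int) (left_index : Int) (right_index : Int) : Decidable (Pre_are_mirrored tree left_index right_index) := by unfold Pre_are_mirrored; infer_instance

def pvWitness_are_mirrored : List Int × Int × Int := ([1, 2, 1], 1, 2)

def Spec_are_mirrored (tree : List Int) (left_index : Int) (right_index : Int) (out : Bool) : Prop := out = are_mirrored_alt tree left_index right_index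
instance (tree : List Int) (left_index : Int) (right_index : Int) (out : Bool) : Decidable (Spec_are_mirrored tree left_index right_index out) := by unfold Spec_are_mirrored; infer_instance

-- ===== CLAIM (what is proved, stated in full; the proofs are below) =====
def Claim_equal_are_mirrored : Prop := ∀ (tree : List Int) (left_index : Int) (right_index : Int), Dom_are_mirrored tree left_index right_index → Pre_are_mirrored tree left_index right_index → Spec_are_mirrored tree left_index right_index (are_mirrored tree left_index right_index)

-- ===== LEMMAS AND PROOFS =====

-- common reference function on Nat indices (proof-only)
def mirrorN (tree : List Int) (l r : Nat) : Bool :=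
  if tree.length ≤ l ∨ tree.length ≤ r then decide (l = r)
  else if tree[l]? ≠ tree[r]? then false
  else mirrorN tree (2*l + 1) (2*r + 2) && mirrorN tree (2*l + 2) (2*r + 1)
termination_by tree.length - l
decreasing_by all_goals omega

lemma auxA_eq (tree : List Int) :
    ∀ (fuel : Nat) (l r : Nat), tree.length ≤ l + fuel →
      are_mirroredAux tree fuel (l : Int) (r : Int) = mirrorN tree l r := by
  intro fuel
  induction fuel with
  | zero =>
      intro l r h
      rw [are_mirroredAux, mirrorN]
      have hl : ((l : Int) ≥ (tree.length : Int)) := by exact_mod_cast h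
      simp [hl]
      omega
  | succ f ih =>
      intro l r h
      rw [are_mirroredAux, mirrorN]
      by_cases hg : tree.length ≤ l ∨ tree.length ≤ r
      · have hg' : (l : Int) ≥ (tree.length : Int) ∨ (r : Int) ≥ (tree.length : Int) := by
          rcases hg with h1 | h1
          · exact Or.inl (by exact_mod_cast h1)
          · exact Or.inr (by exact_mod_cast h1)
        simp [hg]
      · have hg' : ¬((l : Int) ≥ (tree.length : Int) ∨ (r : Int) ≥ (tree.length : Int)) := by
          push_neg at hg ⊢
          exact ⟨by exact_mod_cast hg.1, by exact_mod_cast hg.2⟩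
        rw [if_neg hg', if_neg hg]
        simp only [PySem.List.pyGet?_natCast]
        by_cases hv : tree[l]? ≠ tree[r]?
        · simp [hv]
        · rw [if_neg hv, if_neg hv]
          have e1 : (2 * (l : Int) + 1) = ((2*l + 1 : Nat) : Int) := by push_cast; ring
          have e2 : (2 * ((r : Int) + 1)) = ((2*r + 2 : Nat) : Int) := by push_cast; ring
          have e3 : (2 * ((l : Int) + 1)) = ((2*l + 2 : Nat) : Int) := by push_cast; ring
          have e4 : (2 * (r : Int) + 1) = ((2*r + 1 : Nat) : Int) := by push_cast; ring
          rw [e1, e2, e3, e4, ih (2*l + 1) (2*r + 2) (by omega), ih (2*l + 2) (2*r + 1) (by omega)]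

-- weight of a pair (by its left index) paying for the pops below it
def pairWt (tree : List Int) (l : Nat) : Nat := 3 ^ (tree.length + 2 - l)

def stackWt (tree : List Int) (st : List (Nat × Nat)) : Nat :=
  (st.map (fun p => pairWt tree p.1)).sum

lemma loopB_eq (tree : List Int) :
    ∀ (fuel : Nat) (st : List (Nat × Nat)), stackWt tree st ≤ fuel →
      are_mirroredLoop tree fuel (st.map (fun p => ((p.1 : Int), (p.2 : Int)))) =
        st.all (fun p => mirrorN tree p.1 p.2) := by
  intro fuel
  induction fuel with
  | zero =>
      intro st h
      cases st with
      | nil => simp [are_mirroredLoop]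
      | cons p rest =>
          exfalso
          have h1 : 1 ≤ pairWt tree p.1 := Nat.one_le_pow _ _ (by norm_num)
          have h2 : pairWt tree p.1 ≤ stackWt tree (p :: rest) := by
            simp only [stackWt, List.map_cons, List.sum_cons]
            exact Nat.le_add_right _ _
          omega
  | succ f ih =>
      intro st h
      cases st with
      | nil => simp [are_mirroredLoop]
      | cons p rest =>
          obtain ⟨l, r⟩ := p
          simp only [List.map_cons]
          rw [are_mirroredLoop, List.all_cons, mirrorN]
          have hw1 : 1 ≤ pairWt tree l := Nat.one_le_pow _ _ (by norm_num)
          have hrest : stackWt tree rest ≤ f := by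
            simp only [stackWt, List.map_cons, List.sum_cons] at h ⊢
            omega
          by_cases hg : tree.length ≤ l ∨ tree.length ≤ r
          · have hg' : (l : Int) ≥ (tree.length : Int) ∨ (r : Int) ≥ (tree.length : Int) := by
              rcases hg with h1 | h1
              · exact Or.inl (by exact_mod_cast h1)
              · exact Or.inr (by exact_mod_cast h1)
            rw [if_pos hg', if_pos hg]
            by_cases he : l = r
            · simp [he, ih rest hrest]
            · have : ((l : Int) ≠ (r : Int)) := by exact_mod_cast he
              simp [this, he]
          · have hg' : ¬((l : Int) ≥ (tree.length : Int) ∨ (r : Int) ≥ (tree.length : Int)) := by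
              push_neg at hg ⊢
              exact ⟨by exact_mod_cast hg.1, by exact_mod_cast hg.2⟩
            rw [if_neg hg', if_neg hg]
            simp only [PySem.List.pyGet?_natCast]
            by_cases hv : tree[l]? ≠ tree[r]?
            · simp [hv]
            · rw [if_neg hv, if_neg hv]
              have e1 : (2 * (l : Int) + 2) = ((2*l + 2 : Nat) : Int) := by push_cast; ring
              have e2 : (2 * (r : Int) + 1) = ((2*r + 1 : Nat) : Int) := by push_cast; ring
              have e3 : (2 * (l : Int) + 1) = ((2*l + 1 : Nat) : Int) := by push_cast; ring
              have e4 : (2 * (r : Int) + 2) = ((2*r + 2 : Nat) : Int) := by push_cast; ring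
              rw [e1, e2, e3, e4]
              have hl : l < tree.length := by omega
              have hfuel : stackWt tree ((2*l + 2, 2*r + 1) :: (2*l + 1, 2*r + 2) :: rest) ≤ f := by
                simp only [stackWt, List.map_cons, List.sum_cons] at h ⊢
                have hmono : ∀ a : Nat, l + 1 ≤ a →
                    pairWt tree a ≤ 3 ^ (tree.length + 1 - l) := by
                  intro a ha
                  exact Nat.pow_le_pow_right (by norm_num) (by omega)
                have h1 := hmono (2*l + 2) (by omega)
                have h2 := hmono (2*l + 1) (by omega)
                have hsplit : pairWt tree l = 3 * 3 ^ (tree.length + 1 - l) := by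
                  unfold pairWt
                  rw [show tree.length + 2 - l = (tree.length + 1 - l) + 1 by omega]
                  rw [pow_succ]
                  ring
                have hpos : 1 ≤ 3 ^ (tree.length + 1 - l) := Nat.one_le_pow _ _ (by norm_num)
                omega
              have := ih ((2*l + 2, 2*r + 1) :: (2*l + 1, 2*r + 2) :: rest) hfuel
              simp only [List.map_cons, List.all_cons] at this
              rw [this, ← Bool.and_assoc,
                Bool.and_comm (mirrorN tree (2*l + 2) (2*r + 1)) (mirrorN tree (2*l + 1) (2*r + 2)),
                Bool.and_assoc]

-- ===== VERDICT (by name: the statement is the Claim_ definition above) =====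
theorem are_mirrored_spec : Claim_equal_are_mirrored := by
  intro tree l r _hdom hpre
  obtain ⟨hl, hr⟩ := hpre
  obtain ⟨a, rfl⟩ : ∃ a : Nat, l = (a : Int) := ⟨l.toNat, by omega⟩
  obtain ⟨b, rfl⟩ : ∃ b : Nat, r = (b : Int) := ⟨r.toNat, by omega⟩
  unfold Spec_are_mirrored are_mirrored are_mirrored_alt
  rw [auxA_eq tree (tree.length + 1) a b (by omega)]
  have h := loopB_eq tree (3 ^ (tree.length + 2)) [(a, b)]
    (by
      simp only [stackWt, List.map_cons, List.map_nil, List.sum_cons, List.sum_nil, pairWt]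
      have : tree.length + 2 - a ≤ tree.length + 2 := by omega
      have := Nat.pow_le_pow_right (show 1 ≤ 3 by norm_num) this
      omega)
  simp only [List.map_cons, List.map_nil, List.all_cons, List.all_nil, Bool.and_true] at h
  rw [h]
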